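-- pv_equiv track=rewrite | github.com/haswee/Indoor-Localisation | Map/usageServer.py | get2DIndex
-- ===== SOURCE A (Python) =====
-- def get2DIndex(dataArray, index):
--   out = 0
--   for x in range(0,len(dataArray)):
--     if (index> (out + len(dataArray[x]))):
--       out = out + len(dataArray[x])
--     else:
--       return (x, index-out)
--   return (-1,-1)
-- ===== SOURCE B (Python) =====
-- def get2DIndex(dataArray, index):
--   # Prefix-sum table + binary search (hand-rolled bisect_left, no imports).
--   prefix = []
--   total = 0
--   for row in dataArray:
--     total += len(row)
--     prefix.append(total)
--   lo, hi = 0, len(prefix)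
--   while lo < hi:
--     mid = (lo + hi) // 2
--     if prefix[mid] < index:
--       lo = mid + 1
--     else:
--       hi = mid
--   if lo == len(prefix):
--     return (-1, -1)
--   return (lo, index - (prefix[lo - 1] if lo > 0 else 0))
-- ===== Notes on version B (the rewrite author's own statement) =====
-- stated objective: alternative
-- what changed: Replaces the linear accumulate-and-compare scan with a prefix-sum table built once plus a bisect_left-style binary search over it; the leftmost tied prefix preserves A's behaviour on empty sub-lists.
import Mathlib
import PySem

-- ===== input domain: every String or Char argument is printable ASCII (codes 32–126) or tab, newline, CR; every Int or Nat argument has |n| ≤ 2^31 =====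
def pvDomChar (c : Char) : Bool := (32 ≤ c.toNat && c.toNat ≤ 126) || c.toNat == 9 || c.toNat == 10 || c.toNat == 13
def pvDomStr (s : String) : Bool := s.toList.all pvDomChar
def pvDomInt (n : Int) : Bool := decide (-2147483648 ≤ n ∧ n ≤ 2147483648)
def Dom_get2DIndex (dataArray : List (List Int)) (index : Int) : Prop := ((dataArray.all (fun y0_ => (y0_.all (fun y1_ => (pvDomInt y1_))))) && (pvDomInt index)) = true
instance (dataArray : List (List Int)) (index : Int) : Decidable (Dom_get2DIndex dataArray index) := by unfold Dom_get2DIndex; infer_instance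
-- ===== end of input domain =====

-- B replaces A's linear accumulate-and-compare scan by a prefix-sum table plus a
-- bisect_left-style binary search (alternative decomposition, same exact results).

-- ===== PORT A =====
-- A's for-loop over x with running total `out`; returning inside the loop.
def get2DIndexGo (index : Int) : List (List Int) → Int → Int → Int × Int
  | [], _, _ => (-1, -1)
  | row :: rest, x, out =>
    if index > out + (row.length : Int) then
      get2DIndexGo index rest (x + 1) (out + (row.length : Int))
    else
      (x, index - out)

def get2DIndex (dataArray : List (List Int)) (index : Int) : Int × Int :=
  get2DIndexGo index dataArray 0 0

-- ===== PORT B =====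
-- B's first loop: build the inclusive prefix-sum table of the row lengths.
def buildPrefix : List (List Int) → Int → List Int
  | [], _ => []
  | row :: rest, total =>
    (total + (row.length : Int)) :: buildPrefix rest (total + (row.length : Int))

-- B's while-loop: hand-rolled bisect_left on the prefix table.
def bisectLeft (p : List Int) (index : Int) (lo hi : Nat) : Nat :=
  if _h : lo < hi then
    let mid := (lo + hi) / 2
    if p.getD mid 0 < index then bisectLeft p index (mid + 1) hi
    else bisectLeft p index lo mid
  else lo
termination_by hi - lo
decreasing_by all_goals omega

def get2DIndex_alt (dataArray : List (List Int)) (index : Int) : Int × Int :=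
  let p := buildPrefix dataArray 0
  let lo := bisectLeft p index 0 p.length
  if lo = p.length then (-1, -1)
  else ((lo : Int), index - (if 0 < lo then p.getD (lo - 1) 0 else 0))

-- ===== PRECONDITION & SPEC =====
def Spec_get2DIndex (dataArray : List (List Int)) (index : Int) (out : Int × Int) : Prop := out = get2DIndex_alt dataArray index
instance (dataArray : List (List Int)) (index : Int) (out : Int × Int) : Decidable (Spec_get2DIndex dataArray index out) := by unfold Spec_get2DIndex; infer_instance

-- ===== CLAIM (what is proved, stated in full; the proofs are below) =====
def Claim_equal_get2DIndex : Prop := ∀ (dataArray : List (List Int)) (index : Int), Dom_get2DIndex dataArray index → Spec_get2DIndex dataArray index (get2DIndex dataArray index)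

-- ===== LEMMAS AND PROOFS =====

-- the first position k of the prefix table with index ≤ p[k] (= table length if none)
def firstGE (p : List Int) (index : Int) : Nat := p.findIdx (fun q => index ≤ q)

theorem buildPrefix_le (rows : List (List Int)) (total : Int) :
    ∀ q ∈ buildPrefix rows total, total ≤ q := by
  induction rows generalizing total with
  | nil => simp [buildPrefix]
  | cons r rest ih =>
    intro q hq
    simp only [buildPrefix, List.mem_cons] at hq
    rcases hq with h | h
    · omega
    · have := ih (total + (r.length : Int)) q h; omega

theorem buildPrefix_sorted (rows : List (List Int)) (total : Int) :
    (buildPrefix rows total).Pairwise (· ≤ ·) := by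
  induction rows generalizing total with
  | nil => simp [buildPrefix]
  | cons r rest ih =>
    refine List.Pairwise.cons ?_ (ih _)
    intro q hq
    exact le_trans (by omega) (buildPrefix_le _ _ q hq)

theorem sorted_getD {p : List Int} (hs : p.Pairwise (· ≤ ·)) {i j : Nat}
    (hij : i ≤ j) (hj : j < p.length) : p.getD i 0 ≤ p.getD j 0 := by
  rcases eq_or_lt_of_le hij with rfl | hlt
  · exact le_refl _
  · have hi : i < p.length := lt_trans hlt hj
    have := (List.pairwise_iff_getElem.mp hs) i j hi hj hlt
    simpa [List.getD_eq_getElem?_getD, List.getElem?_eq_getElem, hi, hj] using this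

theorem firstGE_le_length (p : List Int) (index : Int) :
    firstGE p index ≤ p.length := List.findIdx_le_length

theorem firstGE_lt (p : List Int) (index : Int) {i : Nat}
    (h : i < firstGE p index) (hi : i < p.length) : p.getD i 0 < index := by
  have := List.not_of_lt_findIdx (p := fun q => index ≤ q) (xs := p) h
  simp only [List.getD_eq_getElem?_getD, List.getElem?_eq_getElem, hi, Option.getD_some]
  simp only [decide_eq_false_iff_not] at this
  omega

theorem firstGE_ge (p : List Int) (index : Int)
    (h : firstGE p index < p.length) : index ≤ p.getD (firstGE p index) 0 := by
  have := List.findIdx_getElem (w := h) (p := fun q => index ≤ q) (xs := p)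
  simp only [List.getD_eq_getElem?_getD, List.getElem?_eq_getElem, h]
  simpa using this

-- bisectLeft computes firstGE on a sorted table, given the loop invariants
theorem bisectLeft_eq (p : List Int) (index : Int) (hs : p.Pairwise (· ≤ ·)) :
    ∀ lo hi, lo ≤ hi → hi ≤ p.length →
    (∀ i, i < lo → p.getD i 0 < index) →
    (∀ i, hi ≤ i → i < p.length → index ≤ p.getD i 0) →
    bisectLeft p index lo hi = firstGE p index := by
  intro lo hi
  induction hlh : hi - lo using Nat.strong_induction_on generalizing lo hi with
  | _ n ih =>
  intro hle hhi hlow hhigh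
  rw [bisectLeft]
  by_cases h : lo < hi
  · simp only [h, dif_pos]
    set mid := (lo + hi) / 2 with hmid
    have hmlt : mid < hi := by omega
    have hmge : lo ≤ mid := by omega
    by_cases hc : p.getD mid 0 < index
    · simp only [hc, if_pos]
      refine ih (hi - (mid + 1)) (by omega) (mid + 1) hi rfl (by omega) hhi ?_ hhigh
      intro i hi'
      rcases Nat.lt_or_ge i lo with h' | h'
      · exact hlow i h'
      · exact lt_of_le_of_lt (sorted_getD hs (by omega) (by omega)) hc
    · simp only [hc, if_false]
      refine ih (mid - lo) (by omega) lo mid rfl (by omega) (by omega) hlow ?_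
      intro i hmi hip
      have h1 : index ≤ p.getD mid 0 := by omega
      exact le_trans h1 (sorted_getD hs hmi hip)
  · simp only [h, dif_neg, not_false_iff]
    have hlohi : lo = hi := by omega
    subst hlohi
    have h1 := firstGE_le_length p index
    rcases Nat.lt_trichotomy lo (firstGE p index) with h2 | h2 | h2
    · exfalso
      have := firstGE_lt p index h2 (by omega)
      have := hhigh lo (le_refl _) (by omega)
      omega
    · exact h2
    · exfalso
      have hf : firstGE p index < p.length := by omega
      have := firstGE_ge p index hf
      have := hlow _ h2
      omega

-- A's scan computes the same first position, relative to the running prefix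
theorem goA_eq (index : Int) (rows : List (List Int)) :
    ∀ (x out : Int),
    get2DIndexGo index rows x out =
      (let p := buildPrefix rows out
       let k := firstGE p index
       if k = p.length then (-1, -1)
       else (x + (k : Int), index - (if 0 < k then p.getD (k - 1) 0 else out))) := by
  induction rows with
  | nil => intro x out; simp [get2DIndexGo, buildPrefix, firstGE]
  | cons r rest ih =>
    intro x out
    simp only [get2DIndexGo, buildPrefix]
    set t := out + (r.length : Int) with ht
    by_cases hc : index > t
    · simp only [hc, if_pos, ih (x + 1) t]
      have hf : firstGE (t :: buildPrefix rest t) index =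
          firstGE (buildPrefix rest t) index + 1 := by
        unfold firstGE
        rw [List.findIdx_cons]
        simp [show ¬ index ≤ t by omega]
      set k := firstGE (buildPrefix rest t) index with hk
      simp only [hf, List.length_cons]
      by_cases hk' : k = (buildPrefix rest t).length
      · simp [hk']
      · have h0 : ¬ (k + 1 = (buildPrefix rest t).length + 1) := by omega
        simp only [hk', h0, if_false]
        have hgd : (t :: buildPrefix rest t).getD (k + 1 - 1) 0 =
            if 0 < k then (buildPrefix rest t).getD (k - 1) 0 else t := by
          rcases Nat.eq_zero_or_pos k with h | h
          · simp [h]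
          · have : k + 1 - 1 = (k - 1) + 1 := by omega
            simp [this, h]
        rw [hgd]
        simp only [show (0:Nat) < k + 1 from by omega, if_pos, Prod.mk.injEq]
        exact ⟨by push_cast; ring, trivial⟩
    · simp only [hc, if_neg, not_false_iff]
      have hf : firstGE (t :: buildPrefix rest t) index = 0 := by
        unfold firstGE
        rw [List.findIdx_cons]
        simp [show index ≤ t by omega]
      simp [hf]

-- ===== VERDICT (by name: the statement is the Claim_ definition above) =====
theorem get2DIndex_spec : Claim_equal_get2DIndex := by
  unfold Claim_equal_get2DIndex
  intro dataArray index _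
  unfold Spec_get2DIndex get2DIndex get2DIndex_alt
  rw [goA_eq]
  simp only []
  rw [bisectLeft_eq (buildPrefix dataArray 0) index (buildPrefix_sorted _ _) 0
        (buildPrefix dataArray 0).length (Nat.zero_le _) (le_refl _)
        (by intro i h; omega) (by intro i h1 h2; omega)]
  set p := buildPrefix dataArray 0
  set k := firstGE p index
  by_cases hk : k = p.length <;> simp [hk]
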